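-- pv_equiv track=rewrite | github.com/YuvrajSaini09/scraper-ai | scraper.py | get_targeted_urls
-- ===== SOURCE A (Python) =====
-- def get_targeted_urls(keyword):
--     """Get URLs targeted for specific industries based on keyword"""
--     keyword_lower = keyword.lower()
--     targeted_urls = []
--
--     # Local Services, Small Businesses
--     if any(term in keyword_lower for term in ["salon", "shop", "store", "local", "business", "restaurant", "cafe", "bakery", "spa", "gym"]):
--         targeted_urls.extend([
--             "https://www.justdial.com/",
--             "https://www.sulekha.com/",
--             "https://www.nearmetrade.com/",
--             "https://www.clickindia.com/",
--             "https://www.yellowpages.in/"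
--         ])
--
--     # Schools, Colleges, Institutes
--     elif any(term in keyword_lower for term in ["school", "college", "university", "institute", "academy", "education", "coaching"]):
--         targeted_urls.extend([
--             "https://www.icbse.com/",
--             "https://www.schoolmykids.com/",
--             "https://www.edustoke.com/",
--             "https://www.indiastudychannel.com/"
--         ])
--
--     # Micro Influencers, Creators
--     elif any(term in keyword_lower for term in ["influencer", "creator", "youtuber", "blogger", "vlogger", "content"]):
--         targeted_urls.extend([
--             "https://starngage.com/",
--             "https://influence.co/"
--         ])
--
--     # Ad Agencies, Marketing Services
--     elif any(term in keyword_lower for term in ["agency", "marketing", "advertising", "digital", "media", "seo", "ppc"]):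
--         targeted_urls.extend([
--             "https://www.clutch.co/",
--             "https://www.sortlist.com/",
--             "https://www.goodfirms.co/",
--             "https://upcity.com/",
--             "https://www.designrush.com/"
--         ])
--
--     # Editing Agencies, Creative Studios
--     elif any(term in keyword_lower for term in ["edit", "studio", "production", "creative", "design", "video", "film", "photography"]):
--         targeted_urls.extend([
--             "https://www.behance.net/",
--             "https://dribbble.com/",
--             "https://www.productionhub.com/",
--             "https://www.fiverr.com/"
--         ])
--
--     # Business Owners, Freelancers, Startups
--     elif any(term in keyword_lower for term in ["startup", "founder", "entrepreneur", "freelancer", "ceo", "owner", "business"]):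
--         targeted_urls.extend([
--             "https://www.startupindia.gov.in/",
--             "https://angel.co/",
--             "https://www.crunchbase.com/",
--             "https://yourstory.com/"
--         ])
--
--     return targeted_urls
-- ===== SOURCE B (Python) =====
-- # B: inverted hash index. Instead of testing every group's terms against the
-- # keyword, build (once, at module level) a dict mapping each term to its
-- # (priority, urls) — priority = index of the earliest group containing the
-- # term — then enumerate every substring of the lowered keyword whose length
-- # is a possible term length (3..12) and keep the hit with minimal priority.
--
-- _TABLE = [
--     (["salon", "shop", "store", "local", "business", "restaurant", "cafe", "bakery", "spa", "gym"],
--      ["https://www.justdial.com/",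
--       "https://www.sulekha.com/",
--       "https://www.nearmetrade.com/",
--       "https://www.clickindia.com/",
--       "https://www.yellowpages.in/"]),
--     (["school", "college", "university", "institute", "academy", "education", "coaching"],
--      ["https://www.icbse.com/",
--       "https://www.schoolmykids.com/",
--       "https://www.edustoke.com/",
--       "https://www.indiastudychannel.com/"]),
--     (["influencer", "creator", "youtuber", "blogger", "vlogger", "content"],
--      ["https://starngage.com/",
--       "https://influence.co/"]),
--     (["agency", "marketing", "advertising", "digital", "media", "seo", "ppc"],
--      ["https://www.clutch.co/",
--       "https://www.sortlist.com/",
--       "https://www.goodfirms.co/",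
--       "https://upcity.com/",
--       "https://www.designrush.com/"]),
--     (["edit", "studio", "production", "creative", "design", "video", "film", "photography"],
--      ["https://www.behance.net/",
--       "https://dribbble.com/",
--       "https://www.productionhub.com/",
--       "https://www.fiverr.com/"]),
--     (["startup", "founder", "entrepreneur", "freelancer", "ceo", "owner", "business"],
--      ["https://www.startupindia.gov.in/",
--       "https://angel.co/",
--       "https://www.crunchbase.com/",
--       "https://yourstory.com/"]),
-- ]
--
-- # term -> (priority, urls); setdefault keeps the EARLIEST group for duplicate
-- # terms ("business" is in groups 0 and 5), matching the elif order.
-- _TERM_INDEX = {}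
-- for _g, (_terms, _urls) in enumerate(_TABLE):
--     for _t in _terms:
--         _TERM_INDEX.setdefault(_t, (_g, _urls))
--
--
-- def get_targeted_urls(keyword):
--     """Get URLs targeted for specific industries based on keyword"""
--     kl = keyword.lower()
--     n = len(kl)
--     best = None
--     for i in range(n):
--         for length in range(3, 13):  # term lengths are 3..12
--             hit = _TERM_INDEX.get(kl[i:i + length])
--             if hit is not None and (best is None or hit[0] < best[0]):
--                 best = hit
--     return list(best[1]) if best is not None else []
-- ===== Notes on version B (the rewrite author's own statement) =====
-- stated objective: alternative
-- what changed: Inverts the dispatch: instead of testing each group's terms against the keyword in an elif chain, B builds a hash index term->(priority,urls) once at module level and enumerates all substrings of the lowered keyword (lengths 3-12), keeping the minimal-priority hit; the per-group/per-term containment scans disappear.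
import Mathlib
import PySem

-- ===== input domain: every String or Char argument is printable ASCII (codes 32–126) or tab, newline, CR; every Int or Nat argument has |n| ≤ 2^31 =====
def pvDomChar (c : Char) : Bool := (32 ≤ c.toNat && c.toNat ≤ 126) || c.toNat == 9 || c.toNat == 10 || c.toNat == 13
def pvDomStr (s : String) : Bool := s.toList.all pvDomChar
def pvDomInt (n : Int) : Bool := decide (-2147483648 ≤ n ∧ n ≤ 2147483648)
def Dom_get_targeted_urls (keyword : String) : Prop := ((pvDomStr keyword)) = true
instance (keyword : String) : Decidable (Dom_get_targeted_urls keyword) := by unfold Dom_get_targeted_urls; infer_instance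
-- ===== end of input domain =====

-- B inverts A's dispatch: a term -> (priority, urls) hash index built once, then one scan over
-- all substrings (lengths 3..12) of the lowered keyword keeping the minimal-priority hit
-- (alternative algorithm, same result; no speed claim).

-- ===== PORT A =====
-- literal transliteration of A's elif chain; `any(term in kl for term in ts)` = ts.any (isIn · kl)
def get_targeted_urls (keyword : String) : List String :=
  let keyword_lower := PySem.Str.lower keyword
  if ([("salon" : String), "shop", "store", "local", "business", "restaurant", "cafe", "bakery", "spa", "gym"].any
        (fun term => PySem.Str.isIn term keyword_lower)) then
    ["https://www.justdial.com/", "https://www.sulekha.com/", "https://www.nearmetrade.com/",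
     "https://www.clickindia.com/", "https://www.yellowpages.in/"]
  else if ([("school" : String), "college", "university", "institute", "academy", "education", "coaching"].any
        (fun term => PySem.Str.isIn term keyword_lower)) then
    ["https://www.icbse.com/", "https://www.schoolmykids.com/", "https://www.edustoke.com/",
     "https://www.indiastudychannel.com/"]
  else if ([("influencer" : String), "creator", "youtuber", "blogger", "vlogger", "content"].any
        (fun term => PySem.Str.isIn term keyword_lower)) then
    ["https://starngage.com/", "https://influence.co/"]
  else if ([("agency" : String), "marketing", "advertising", "digital", "media", "seo", "ppc"].any
        (fun term => PySem.Str.isIn term keyword_lower)) then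
    ["https://www.clutch.co/", "https://www.sortlist.com/", "https://www.goodfirms.co/",
     "https://upcity.com/", "https://www.designrush.com/"]
  else if ([("edit" : String), "studio", "production", "creative", "design", "video", "film", "photography"].any
        (fun term => PySem.Str.isIn term keyword_lower)) then
    ["https://www.behance.net/", "https://dribbble.com/", "https://www.productionhub.com/",
     "https://www.fiverr.com/"]
  else if ([("startup" : String), "founder", "entrepreneur", "freelancer", "ceo", "owner", "business"].any
        (fun term => PySem.Str.isIn term keyword_lower)) then
    ["https://www.startupindia.gov.in/", "https://angel.co/", "https://www.crunchbase.com/",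
     "https://yourstory.com/"]
  else []

-- ===== PORT B =====
-- Source B's module-level _TABLE
def pvTable : List (List String × List String) :=
  [(["salon", "shop", "store", "local", "business", "restaurant", "cafe", "bakery", "spa", "gym"],
    ["https://www.justdial.com/", "https://www.sulekha.com/", "https://www.nearmetrade.com/",
     "https://www.clickindia.com/", "https://www.yellowpages.in/"]),
   (["school", "college", "university", "institute", "academy", "education", "coaching"],
    ["https://www.icbse.com/", "https://www.schoolmykids.com/", "https://www.edustoke.com/",
     "https://www.indiastudychannel.com/"]),
   (["influencer", "creator", "youtuber", "blogger", "vlogger", "content"],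
    ["https://starngage.com/", "https://influence.co/"]),
   (["agency", "marketing", "advertising", "digital", "media", "seo", "ppc"],
    ["https://www.clutch.co/", "https://www.sortlist.com/", "https://www.goodfirms.co/",
     "https://upcity.com/", "https://www.designrush.com/"]),
   (["edit", "studio", "production", "creative", "design", "video", "film", "photography"],
    ["https://www.behance.net/", "https://dribbble.com/", "https://www.productionhub.com/",
     "https://www.fiverr.com/"]),
   (["startup", "founder", "entrepreneur", "freelancer", "ceo", "owner", "business"],
    ["https://www.startupindia.gov.in/", "https://angel.co/", "https://www.crunchbase.com/",
     "https://yourstory.com/"])]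

-- Source B's module-level build of _TERM_INDEX: term -> (priority, urls), setdefault keeps the earliest group
def pvTermIndex : PySem.Dict String (Int × List String) :=
  (PySem.List.enumerate pvTable).foldl
    (fun d gp => gp.2.1.foldl (fun d t => d.setdefault t (gp.1, gp.2.2)) d)
    PySem.Dict.empty

-- Source B's get_targeted_urls: scan every substring kl[i:i+length], length in range(3,13),
-- keep the dict hit with minimal priority; return its url list (or []).
def get_targeted_urls_alt (keyword : String) : List String :=
  let kl := PySem.Str.lower keyword
  let n : Int := PySem.Str.len kl
  let best :=
    (PySem.List.pyRange 0 n 1).foldl (fun best i =>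
      (PySem.List.pyRange 3 13 1).foldl (fun best length =>
        match pvTermIndex.get? (PySem.Str.slice kl (some i) (some (i + length))) with
        | some hit => if best.elim true (fun b => hit.1 < b.1) then some hit else best
        | none => best) best) none
  match best with
  | some b => b.2
  | none => []

-- ===== PRECONDITION & SPEC =====
def Spec_get_targeted_urls (keyword : String) (out : List String) : Prop := out = get_targeted_urls_alt keyword
instance (keyword : String) (out : List String) : Decidable (Spec_get_targeted_urls keyword out) := by unfold Spec_get_targeted_urls; infer_instance

-- ===== CLAIM (what is proved, stated in full; the proofs are below) =====
def Claim_equal_get_targeted_urls : Prop := ∀ (keyword : String), Dom_get_targeted_urls keyword → Spec_get_targeted_urls keyword (get_targeted_urls keyword)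

-- ===== LEMMAS AND PROOFS =====

-- proof-side name for B's loop body ("keep the better hit")
def pvStep (best o : Option (Int × List String)) : Option (Int × List String) :=
  match o with
  | some hit => if best.elim true (fun b => hit.1 < b.1) then some hit else best
  | none => best

-- the flat list of all dict lookups B's double loop performs
def pvAllOpts (kl : String) : List (Option (Int × List String)) :=
  (PySem.List.pyRange 0 (PySem.Str.len kl) 1).flatMap (fun i =>
    (PySem.List.pyRange 3 13 1).map (fun length =>
      pvTermIndex.get? (PySem.Str.slice kl (some i) (some (i + length)))))

-- group g's term / url lists, read off pvTable
def pvTermsOf (g : Int) : List String :=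
  ((PySem.List.pyGet? pvTable g).map (·.1)).getD []
def pvUrlsOf (g : Int) : List String :=
  ((PySem.List.pyGet? pvTable g).map (·.2)).getD []

-- B's result is the pvStep-fold over the flat lookup list
set_option maxHeartbeats 1000000 in
set_option maxRecDepth 100000 in
lemma alt_eq (keyword : String) :
    get_targeted_urls_alt keyword =
      match (pvAllOpts (PySem.Str.lower keyword)).foldl pvStep none with
      | some b => b.2
      | none => [] := by
  have hfun : (fun (best : Option (Int × List String)) (i : Int) =>
        (PySem.List.pyRange 3 13 1).foldl (fun best length =>
          match pvTermIndex.get? (PySem.Str.slice (PySem.Str.lower keyword) (some i) (some (i + length))) with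
          | some hit => if best.elim true (fun b => hit.1 < b.1) then some hit else best
          | none => best) best)
      = (fun (acc : Option (Int × List String)) (i : Int) =>
        ((PySem.List.pyRange 3 13 1).map (fun length =>
          pvTermIndex.get? (PySem.Str.slice (PySem.Str.lower keyword) (some i) (some (i + length))))).foldl pvStep acc) := by
    funext best i
    rw [List.foldl_map]
    rfl
  show (match (PySem.List.pyRange 0 (PySem.Str.len (PySem.Str.lower keyword)) 1).foldl
      (fun best i =>
        (PySem.List.pyRange 3 13 1).foldl (fun best length =>
          match pvTermIndex.get? (PySem.Str.slice (PySem.Str.lower keyword) (some i) (some (i + length))) with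
          | some hit => if best.elim true (fun b => hit.1 < b.1) then some hit else best
          | none => best) best) none with
    | some b => b.2
    | none => []) = _
  rw [hfun]
  unfold pvAllOpts
  rw [List.foldl_flatMap]

-- every key of pvTermIndex lies in its priority's group, with that group's urls
set_option maxHeartbeats 4000000 in
set_option maxRecDepth 100000 in
lemma dict_sound : ∀ p ∈ pvTermIndex.items,
    0 ≤ p.2.1 ∧ p.2.1 < 6 ∧ p.1 ∈ pvTermsOf p.2.1 ∧ p.2.2 = pvUrlsOf p.2.1 := by decide

-- every term of group g is a key, with priority ≤ g and its priority's urls; lengths 3..12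
set_option maxHeartbeats 4000000 in
set_option maxRecDepth 100000 in
lemma group_hit : ∀ g ∈ ([0, 1, 2, 3, 4, 5] : List Int), ∀ t ∈ pvTermsOf g,
    (match pvTermIndex.get? t with
     | some v => decide (v.1 ≤ g) && decide (v.2 = pvUrlsOf v.1)
     | none => false) = true
    ∧ 3 ≤ t.toList.length ∧ t.toList.length ≤ 12 := by decide

lemma foldl_pvStep_none (l : List (Option (Int × List String))) :
    ∀ acc, l.foldl pvStep acc = none ↔ acc = none ∧ ∀ o ∈ l, o = none := by
  induction l with
  | nil => intro acc; simp
  | cons o l ih =>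
    intro acc
    rw [List.foldl_cons, ih]
    cases o with
    | none => simp [pvStep]
    | some hit =>
      cases acc with
      | none => simp [pvStep]
      | some a =>
        simp only [pvStep, Option.elim]
        split_ifs <;> simp

lemma foldl_pvStep_some (l : List (Option (Int × List String))) :
    ∀ acc v, l.foldl pvStep acc = some v →
      (acc = some v ∨ some v ∈ l) ∧ (∀ w, acc = some w → v.1 ≤ w.1) ∧
      (∀ w, some w ∈ l → v.1 ≤ w.1) := by
  induction l with
  | nil => intro acc v h; simp at h; simp [h]
  | cons o l ih =>
    intro acc v h
    rw [List.foldl_cons] at h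
    obtain ⟨h1, h2, h3⟩ := ih (pvStep acc o) v h
    cases o with
    | none =>
      simp only [pvStep] at h1 h2
      refine ⟨?_, h2, fun w hw => ?_⟩
      · rcases h1 with h1 | h1
        · exact Or.inl h1
        · exact Or.inr (List.mem_cons_of_mem _ h1)
      · rcases List.mem_cons.mp hw with hw | hw
        · cases hw
        · exact h3 w hw
    | some hit =>
      cases acc with
      | none =>
        simp only [pvStep, Option.elim, if_true] at h1 h2
        have hvhit : v.1 ≤ hit.1 := h2 hit rfl
        refine ⟨Or.inr ?_, fun w hw => ?_, fun w hw => ?_⟩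
        · rcases h1 with h1 | h1
          · exact List.mem_cons.mpr (Or.inl h1.symm)
          · exact List.mem_cons_of_mem _ h1
        · cases hw
        · rcases List.mem_cons.mp hw with hw | hw
          · cases hw; exact hvhit
          · exact h3 w hw
      | some a =>
        by_cases hc : hit.1 < a.1
        · simp only [pvStep, Option.elim, hc, decide_true, if_true] at h1 h2
          have hvhit : v.1 ≤ hit.1 := h2 hit rfl
          refine ⟨Or.inr ?_, fun w hw => ?_, fun w hw => ?_⟩
          · rcases h1 with h1 | h1
            · exact List.mem_cons.mpr (Or.inl h1.symm)
            · exact List.mem_cons_of_mem _ h1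
          · cases hw
            exact le_of_lt (lt_of_le_of_lt hvhit hc)
          · rcases List.mem_cons.mp hw with hw | hw
            · cases hw; exact hvhit
            · exact h3 w hw
        · simp only [pvStep, Option.elim, hc, decide_false] at h1 h2
          push_neg at hc
          have hva : v.1 ≤ a.1 := h2 a rfl
          refine ⟨?_, fun w hw => ?_, fun w hw => ?_⟩
          · rcases h1 with h1 | h1
            · exact Or.inl h1
            · exact Or.inr (List.mem_cons_of_mem _ h1)
          · cases hw; exact hva
          · rcases List.mem_cons.mp hw with hw | hw
            · cases hw; exact le_trans hva hc
            · exact h3 w hw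

-- any value delivered by a lookup in B's scan names a group that really matches kl
lemma allOpts_sound {kl : String} {v : Int × List String} (h : some v ∈ pvAllOpts kl) :
    0 ≤ v.1 ∧ v.1 < 6 ∧ v.2 = pvUrlsOf v.1 ∧
      (pvTermsOf v.1).any (fun t => PySem.Str.isIn t kl) = true := by
  unfold pvAllOpts at h
  rw [List.mem_flatMap] at h
  obtain ⟨i, hi, hmem⟩ := h
  rw [List.mem_map] at hmem
  obtain ⟨L, hL, hget⟩ := hmem
  rw [PySem.List.mem_pyRange_one] at hi hL
  have hp := PySem.Dict.mem_items_of_get?_eq_some _ hget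
  obtain ⟨h0, h6, hmem', hurl⟩ := dict_sound _ hp
  refine ⟨h0, h6, hurl, List.any_eq_true.mpr ⟨_, hmem', ?_⟩⟩
  rw [PySem.Str.isIn_iff_infix]
  have hts : (PySem.Str.slice kl (some i) (some (i + L))).toList
      = (kl.toList.drop i.toNat).take ((i + L).toNat - i.toNat) := by
    simp only [pysem]
    obtain ⟨hi1, hi2⟩ := hi
    obtain ⟨hL1, hL2⟩ := hL
    rw [PySem.List.slice_toNat _ hi1 (by omega)]
  rw [hts]
  exact ((List.take_prefix _ _).isInfix).trans (List.drop_suffix _ _).isInfix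

-- a term that occurs in kl is looked up by B's scan
lemma mem_allOpts_of_isIn {kl t : String} (h : PySem.Str.isIn t kl = true)
    (h3 : 3 ≤ t.toList.length) (h12 : t.toList.length ≤ 12) :
    pvTermIndex.get? t ∈ pvAllOpts kl := by
  have hchars : PySem.Chars.isIn t.toList kl.toList = true := by
    rw [← h]; simp [pysem]
  obtain ⟨j, hj⟩ := (PySem.Chars.exists_prefix_drop_iff_isIn _ _).mpr hchars
  have hjlt : j < kl.toList.length := by
    by_contra h'
    push_neg at h'
    rw [List.drop_eq_nil_of_le h'] at hj
    have := List.prefix_nil.mp hj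
    rw [this] at h3
    simp at h3
  have htake : (kl.toList.drop j).take t.toList.length = t.toList :=
    (List.prefix_iff_eq_take.mp hj).symm
  have hslice : PySem.Str.slice kl (some (j : Int)) (some ((j : Int) + (t.toList.length : Int))) = t := by
    apply String.toList_inj.mp
    have : (PySem.Str.slice kl (some (j : Int)) (some ((j : Int) + (t.toList.length : Int)))).toList
        = PySem.List.slice kl.toList (some (j : Int)) (some ((j : Int) + (t.toList.length : Int))) := by
      simp [pysem]
    rw [this, PySem.List.slice_natCast_add]
    exact htake
  have hlen : PySem.Str.len kl = (kl.toList.length : Int) := by simp [pysem]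
  unfold pvAllOpts
  rw [List.mem_flatMap]
  refine ⟨(j : Int), ?_, ?_⟩
  · rw [PySem.List.mem_pyRange_one, hlen]
    omega
  · rw [List.mem_map]
    refine ⟨(t.toList.length : Int), ?_, by rw [hslice]⟩
    rw [PySem.List.mem_pyRange_one]
    omega

-- a matching group g whose predecessors do not match forces B's fold to (g, pvUrlsOf g)
lemma branch_case (kl : String) (g : Int) (hg : g ∈ ([0, 1, 2, 3, 4, 5] : List Int))
    (hmatch : (pvTermsOf g).any (fun t => PySem.Str.isIn t kl) = true)
    (hmin : ∀ g', 0 ≤ g' → g' < g → (pvTermsOf g').any (fun t => PySem.Str.isIn t kl) = false) :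
    (match (pvAllOpts kl).foldl pvStep none with
     | some b => b.2
     | none => ([] : List String)) = pvUrlsOf g := by
  obtain ⟨t, ht, hIn⟩ := List.any_eq_true.mp hmatch
  obtain ⟨hmatchb, hl3, hl12⟩ := group_hit g hg t ht
  cases hq : pvTermIndex.get? t with
  | none => rw [hq] at hmatchb; simp at hmatchb
  | some v =>
    rw [hq] at hmatchb
    simp only [Bool.and_eq_true, decide_eq_true_eq] at hmatchb
    obtain ⟨hvle, -⟩ := hmatchb
    have hmemv : some v ∈ pvAllOpts kl := by
      rw [← hq]; exact mem_allOpts_of_isIn hIn hl3 hl12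
    cases hfold : (pvAllOpts kl).foldl pvStep none with
    | none =>
      have := ((foldl_pvStep_none _ _).mp hfold).2 _ hmemv
      cases this
    | some w =>
      obtain ⟨-, -, hw3⟩ := foldl_pvStep_some _ _ _ hfold
      have hwmem : some w ∈ pvAllOpts kl := by
        rcases (foldl_pvStep_some _ _ _ hfold).1 with h | h
        · cases h
        · exact h
      obtain ⟨hw0, -, hwurl, hwany⟩ := allOpts_sound hwmem
      have hlew : w.1 ≤ g := le_trans (hw3 v hmemv) hvle
      have hweq : w.1 = g := by
        rcases lt_or_eq_of_le hlew with hlt | he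
        · have hfalse := hmin w.1 hw0 hlt
          rw [hwany] at hfalse
          cases hfalse
        · exact he
      show w.2 = pvUrlsOf g
      rw [hwurl, hweq]

-- no group matches: B's fold finds nothing
lemma none_case (kl : String)
    (h : ∀ g', 0 ≤ g' → g' < 6 → (pvTermsOf g').any (fun t => PySem.Str.isIn t kl) = false) :
    (pvAllOpts kl).foldl pvStep none = none := by
  rw [foldl_pvStep_none]
  refine ⟨rfl, fun o ho => ?_⟩
  cases o with
  | none => rfl
  | some v =>
    obtain ⟨h0, h6, -, hany⟩ := allOpts_sound ho
    have hfalse := h v.1 h0 h6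
    rw [hany] at hfalse
    cases hfalse

-- the chain A computes equals the fold B computes, over the same lowered string
lemma chain_eq_fold (kl : String) :
    (if ([("salon" : String), "shop", "store", "local", "business", "restaurant", "cafe", "bakery", "spa", "gym"].any
          (fun term => PySem.Str.isIn term kl)) then
      ["https://www.justdial.com/", "https://www.sulekha.com/", "https://www.nearmetrade.com/",
       "https://www.clickindia.com/", "https://www.yellowpages.in/"]
    else if ([("school" : String), "college", "university", "institute", "academy", "education", "coaching"].any
          (fun term => PySem.Str.isIn term kl)) then
      ["https://www.icbse.com/", "https://www.schoolmykids.com/", "https://www.edustoke.com/",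
       "https://www.indiastudychannel.com/"]
    else if ([("influencer" : String), "creator", "youtuber", "blogger", "vlogger", "content"].any
          (fun term => PySem.Str.isIn term kl)) then
      ["https://starngage.com/", "https://influence.co/"]
    else if ([("agency" : String), "marketing", "advertising", "digital", "media", "seo", "ppc"].any
          (fun term => PySem.Str.isIn term kl)) then
      ["https://www.clutch.co/", "https://www.sortlist.com/", "https://www.goodfirms.co/",
       "https://upcity.com/", "https://www.designrush.com/"]
    else if ([("edit" : String), "studio", "production", "creative", "design", "video", "film", "photography"].any
          (fun term => PySem.Str.isIn term kl)) then
      ["https://www.behance.net/", "https://dribbble.com/", "https://www.productionhub.com/",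
       "https://www.fiverr.com/"]
    else if ([("startup" : String), "founder", "entrepreneur", "freelancer", "ceo", "owner", "business"].any
          (fun term => PySem.Str.isIn term kl)) then
      ["https://www.startupindia.gov.in/", "https://angel.co/", "https://www.crunchbase.com/",
       "https://yourstory.com/"]
    else []) =
      match (pvAllOpts kl).foldl pvStep none with
      | some b => b.2
      | none => [] := by
  split_ifs with h0 h1 h2 h3 h4 h5
  · exact (branch_case kl 0 (by decide) h0 (fun g' ha hb => absurd hb (by omega))).symm
  · refine (branch_case kl 1 (by decide) h1 (fun g' ha hb => ?_)).symm
    interval_cases g'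
    · exact Bool.eq_false_iff.mpr h0
  · refine (branch_case kl 2 (by decide) h2 (fun g' ha hb => ?_)).symm
    interval_cases g'
    · exact Bool.eq_false_iff.mpr h0
    · exact Bool.eq_false_iff.mpr h1
  · refine (branch_case kl 3 (by decide) h3 (fun g' ha hb => ?_)).symm
    interval_cases g'
    · exact Bool.eq_false_iff.mpr h0
    · exact Bool.eq_false_iff.mpr h1
    · exact Bool.eq_false_iff.mpr h2
  · refine (branch_case kl 4 (by decide) h4 (fun g' ha hb => ?_)).symm
    interval_cases g'
    · exact Bool.eq_false_iff.mpr h0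
    · exact Bool.eq_false_iff.mpr h1
    · exact Bool.eq_false_iff.mpr h2
    · exact Bool.eq_false_iff.mpr h3
  · refine (branch_case kl 5 (by decide) h5 (fun g' ha hb => ?_)).symm
    interval_cases g'
    · exact Bool.eq_false_iff.mpr h0
    · exact Bool.eq_false_iff.mpr h1
    · exact Bool.eq_false_iff.mpr h2
    · exact Bool.eq_false_iff.mpr h3
    · exact Bool.eq_false_iff.mpr h4
  · have hn := none_case kl (fun g' ha hb => by
      interval_cases g'
      · exact Bool.eq_false_iff.mpr h0
      · exact Bool.eq_false_iff.mpr h1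
      · exact Bool.eq_false_iff.mpr h2
      · exact Bool.eq_false_iff.mpr h3
      · exact Bool.eq_false_iff.mpr h4
      · exact Bool.eq_false_iff.mpr h5)
    rw [hn]

-- ===== VERDICT (by name: the statement is the Claim_ definition above) =====
theorem get_targeted_urls_spec : Claim_equal_get_targeted_urls := by
  intro keyword _
  show get_targeted_urls keyword = get_targeted_urls_alt keyword
  rw [alt_eq]
  exact chain_eq_fold (PySem.Str.lower keyword)
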